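-- pv_equiv track=rewrite | github.com/DevFullStack-Franklyn-R-Silva/IntroducaoAEstruturaDeDadosPython | IntroducaoAEstruturaDeDados/somaMax.py | somaMax
-- ===== SOURCE A (Python) =====
-- def somaMax(lista):
-- 	somaMaior = -1
-- 	iMax = 0
-- 	jMax = 0
-- 	for i in range(len(lista)):
-- 		for j in range(len(lista)):
-- 			if i != j:
-- 				soma = lista[i]+lista[j]
-- 				if soma > somaMaior:
-- 					somaMaior = soma
-- 					iMax = lista[i]
-- 					jMax = lista[j]
-- 	return somaMaior,iMax,jMax
-- ===== SOURCE B (Python) =====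
-- def somaMax(lista):
--     if len(lista) < 2:
--         raise ValueError("somaMax needs at least two elements")
--     # single pass: m1 = largest value, m2 = largest after removing one copy of m1
--     m1, m2 = (lista[0], lista[1]) if lista[0] >= lista[1] else (lista[1], lista[0])
--     for v in lista[2:]:
--         if v > m1:
--             m1, m2 = v, m1
--         elif v > m2:
--             m2 = v
--     s = m1 + m2
--     # report the first element (in list order) that belongs to a maximum pair
--     # (exactly those v with v >= m2); its best partner is then s - v
--     for v in lista:
--         if v >= m2:
--             return s, v, s - v
-- ===== Notes on version B (the rewrite author's own statement) =====
-- stated objective: faster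
-- what changed: replaces the O(n^2) scan over all ordered index pairs by a single O(n) pass tracking the two largest values (second = max after removing one copy of the first), then one scan for the first element that belongs to a maximum pair; Pre_ excludes lists with fewer than two elements, where no pair exists, A returns its initial sentinel triple and B raises ValueError.
-- intended difference: on lists of length at least 2 whose every distinct-index pair sums to at most -1, A returns its untouched initial state of sum -1 and two zero values because somaMaior starts at -1, while B returns the actual maximum pair sum and its two values, which is the intended answer. — e.g. on somaMax([-5, -3]): A returns [-1, 0, 0], B returns [-8, -5, -3]
-- outside the precondition, e.g. on somaMax([]): A returns (-1, 0, 0), B raises ValueError; on somaMax([5]): A returns (-1, 0, 0), B raises ValueError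
import Mathlib
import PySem

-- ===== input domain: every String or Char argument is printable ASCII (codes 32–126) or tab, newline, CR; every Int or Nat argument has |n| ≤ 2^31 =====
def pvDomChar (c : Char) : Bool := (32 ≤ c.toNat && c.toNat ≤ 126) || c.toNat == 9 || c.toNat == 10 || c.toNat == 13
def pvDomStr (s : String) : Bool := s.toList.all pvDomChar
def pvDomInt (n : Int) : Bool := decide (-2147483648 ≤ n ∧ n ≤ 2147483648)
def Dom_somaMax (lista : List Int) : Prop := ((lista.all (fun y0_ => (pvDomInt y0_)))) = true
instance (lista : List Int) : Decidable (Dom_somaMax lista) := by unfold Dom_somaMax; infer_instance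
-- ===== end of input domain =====

-- B replaces A's O(n^2) scan over all ordered index pairs by a single O(n) pass tracking the
-- two largest values, plus one scan for the first element that belongs to a maximum pair.

-- ===== PORT A =====
def somaMax (lista : List Int) : List Int :=
  let n : Int := (lista.length : Int)
  let s :=
    (PySem.List.pyRange 0 n 1).foldl (fun s i =>
      (PySem.List.pyRange 0 n 1).foldl (fun s j =>
        if i ≠ j then
          let soma := PySem.List.pyGetD lista i 0 + PySem.List.pyGetD lista j 0
          if soma > s.1 then (soma, PySem.List.pyGetD lista i 0, PySem.List.pyGetD lista j 0)
          else s
        else s) s) ((-1 : Int), (0 : Int), (0 : Int))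
  [s.1, s.2.1, s.2.2]

-- ===== PORT B =====
-- one step of B's single pass: keep the largest and second-largest value seen so far
def somaMaxAltStep (st : Int × Int) (v : Int) : Int × Int :=
  if v > st.1 then (v, st.1) else if v > st.2 then (st.1, v) else st

def somaMax_alt (lista : List Int) : List Int :=
  match lista with
  | x0 :: x1 :: rest =>
    let init := if x0 ≥ x1 then (x0, x1) else (x1, x0)
    let st := rest.foldl somaMaxAltStep init
    let s := st.1 + st.2
    match lista.find? (fun v => decide (st.2 ≤ v)) with
    | some v => [s, v, s - v]
    | none => []          -- unreachable: the maximum itself satisfies st.2 ≤ v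
  | _ => []               -- B raises ValueError here; excluded by Pre_somaMax

-- ===== PRECONDITION & SPEC =====
-- Pre_ excludes lists with fewer than two elements: no pair of distinct indices exists, A
-- returns its untouched initial sentinel triple, and B raises ValueError.
def Pre_somaMax (lista : List Int) : Prop := 2 ≤ lista.length
instance (lista : List Int) : Decidable (Pre_somaMax lista) := by unfold Pre_somaMax; infer_instance
def pvWitness_somaMax : List Int := [1, 2]

-- On lists of length at least 2 whose every distinct-index pair sums to at most -1, A returns
-- its untouched initial state of sum -1 and two zero values because somaMaior starts at -1,
-- while B returns the actual maximum pair sum and its two values, which is the intended answer.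
def D_somaMax (lista : List Int) : Prop :=
  2 ≤ lista.length ∧
    ∀ i < lista.length, ∀ j < lista.length, i ≠ j → lista.getD i 0 + lista.getD j 0 ≤ -1
instance (lista : List Int) : Decidable (D_somaMax lista) := by unfold D_somaMax; infer_instance

def Spec_somaMax (lista : List Int) (out : List Int) : Prop :=
  ¬ D_somaMax lista → out = somaMax_alt lista
instance (lista : List Int) (out : List Int) : Decidable (Spec_somaMax lista out) := by unfold Spec_somaMax; infer_instance

def pvDiffWitness_somaMax : List Int := [-5, -3]
def pvDiffWitnessOut_somaMax : (List Int) × (List Int) := ([-1, 0, 0], [-8, -5, -3])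

-- ===== CLAIM (what is proved, stated in full; the proofs are below) =====
def Claim_unchanged_somaMax : Prop := ∀ (lista : List Int), Dom_somaMax lista → Pre_somaMax lista → Spec_somaMax lista (somaMax lista)
def Claim_changed_somaMax : Prop := Dom_somaMax (pvDiffWitness_somaMax) ∧ Pre_somaMax (pvDiffWitness_somaMax) ∧ D_somaMax (pvDiffWitness_somaMax) ∧ somaMax (pvDiffWitness_somaMax) = pvDiffWitnessOut_somaMax.1 ∧ somaMax_alt (pvDiffWitness_somaMax) = pvDiffWitnessOut_somaMax.2 ∧ pvDiffWitnessOut_somaMax.1 ≠ pvDiffWitnessOut_somaMax.2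
def Claim_exact_somaMax : Prop := ∀ (lista : List Int), Dom_somaMax lista → Pre_somaMax lista → D_somaMax lista → somaMax lista ≠ somaMax_alt lista

-- ===== LEMMAS AND PROOFS =====

-- A's update on one ordered pair of values
def updP (s : Int × Int × Int) (p : Int × Int) : Int × Int × Int :=
  if p.1 + p.2 > s.1 then (p.1 + p.2, p.1, p.2) else s

-- the ordered-pair values A scans, in A's scan order
def somaMaxPS (l : List Int) : List (Int × Int) :=
  (List.range l.length).flatMap (fun a =>
    ((List.range l.length).filter (fun b => decide (¬ a = b))).map
      (fun b => (l.getD a 0, l.getD b 0)))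

lemma foldl_flatMap_eq {α β γ : Type} (xs : List α) (g : α → List β) (f : γ → β → γ) (init : γ) :
    (xs.flatMap g).foldl f init = xs.foldl (fun s x => (g x).foldl f s) init := by
  induction xs generalizing init with
  | nil => rfl
  | cons x xs ih => simp [List.flatMap_cons, List.foldl_append, ih]

lemma somaMax_eq_PS (l : List Int) :
    somaMax l = [((somaMaxPS l).foldl updP (-1, 0, 0)).1,
                 ((somaMaxPS l).foldl updP (-1, 0, 0)).2.1,
                 ((somaMaxPS l).foldl updP (-1, 0, 0)).2.2] := by
  unfold somaMax somaMaxPS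
  dsimp only
  rw [foldl_flatMap_eq, PySem.List.pyRange_one]
  simp only [Int.sub_zero, Int.toNat_natCast, List.foldl_map, zero_add]
  rw [PySem.List.foldl_congr_mem _ _
    (fun s (a : Nat) => ((((List.range l.length).filter (fun b => decide (¬ a = b))).map
      (fun b => (l.getD a 0, l.getD b 0))).foldl updP s)) _ ?_]
  · simp only [List.foldl_map]
  · intro s a _
    dsimp only
    rw [List.foldl_map (f := fun b : Nat => (l.getD a 0, l.getD b 0)) (g := updP),
        ← PySem.List.foldl_ite_eq_foldl_filter (p := fun b : Nat => ¬ a = b)]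
    apply PySem.List.foldl_congr_mem
    intro acc b _
    simp only [PySem.List.pyGetD_natCast, updP, Ne, Int.natCast_inj]

lemma mem_PS {l : List Int} {p : Int × Int} :
    p ∈ somaMaxPS l ↔ ∃ (a b : Nat) (ha : a < l.length) (hb : b < l.length),
      a ≠ b ∧ p = (l[a], l[b]) := by
  simp only [somaMaxPS, List.mem_flatMap, List.mem_map, List.mem_filter, List.mem_range,
    decide_eq_true_eq]
  constructor
  · rintro ⟨a, ha, b, ⟨hb, hne⟩, rfl⟩
    exact ⟨a, b, ha, hb, hne, by rw [List.getD_eq_getElem _ _ ha, List.getD_eq_getElem _ _ hb]⟩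
  · rintro ⟨a, b, ha, hb, hne, rfl⟩
    exact ⟨a, ha, b, ⟨hb, hne⟩, by rw [List.getD_eq_getElem _ _ ha, List.getD_eq_getElem _ _ hb]⟩

lemma foldl_updP_stable (ps : List (Int × Int)) (s : Int × Int × Int)
    (h : ∀ p ∈ ps, p.1 + p.2 ≤ s.1) : ps.foldl updP s = s := by
  induction ps with
  | nil => rfl
  | cons p tl ih =>
    have hp := h p (by simp)
    simp only [List.foldl_cons, updP, if_neg (by omega : ¬ p.1 + p.2 > s.1)]
    exact ih (fun q hq => h q (by simp [hq]))

lemma foldl_updP_found (ps : List (Int × Int)) (s : Int × Int × Int) (S : Int)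
    (hS : s.1 < S) (hub : ∀ p ∈ ps, p.1 + p.2 ≤ S) (hex : ∃ p ∈ ps, p.1 + p.2 = S) :
    ∃ q, ps.find? (fun p => decide (p.1 + p.2 = S)) = some q ∧
      ps.foldl updP s = (S, q.1, q.2) := by
  induction ps generalizing s with
  | nil => simp at hex
  | cons p tl ih =>
    by_cases hp : p.1 + p.2 = S
    · refine ⟨p, by simp [hp], ?_⟩
      simp only [List.foldl_cons, updP, hp, if_pos (by omega : S > s.1)]
      exact foldl_updP_stable tl (S, p.1, p.2) (fun q hq => hub q (by simp [hq]))
    · have hub' : ∀ q ∈ tl, q.1 + q.2 ≤ S := fun q hq => hub q (by simp [hq])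
      have hex' : ∃ q ∈ tl, q.1 + q.2 = S := by
        rcases hex with ⟨q, hq, hqS⟩
        rcases List.mem_cons.mp hq with h | h
        · exact absurd (h ▸ hqS) hp
        · exact ⟨q, h, hqS⟩
      have hple := hub p (by simp)
      rcases ih (updP s p) (by unfold updP; split <;> omega) hub' hex' with ⟨q, hfind, hfold⟩
      exact ⟨q, by simp [hp, hfind], by simpa using hfold⟩

-- Option-state version of B's step, used only to state the invariant uniformly
def somaMaxTop2Step (st : Option Int × Option Int) (v : Int) : Option Int × Option Int :=
  match st.1 with
  | none => (some v, st.2)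
  | some m1 =>
    if v > m1 then (some v, some m1)
    else
      match st.2 with
      | none => (some m1, some v)
      | some m2 => if v > m2 then (some m1, some v) else (some m1, some m2)

lemma altStep_eq_top2 (rest : List Int) (a b : Int) :
    rest.foldl somaMaxTop2Step (some a, some b) =
      (some (rest.foldl somaMaxAltStep (a, b)).1, some (rest.foldl somaMaxAltStep (a, b)).2) := by
  induction rest generalizing a b with
  | nil => rfl
  | cons v tl ih =>
    simp only [List.foldl_cons, somaMaxTop2Step, somaMaxAltStep]
    by_cases h1 : v > a
    · simp only [if_pos h1]; exact ih v a
    · by_cases h2 : v > b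
      · simp only [if_neg h1, if_pos h2]; exact ih a v
      · simp only [if_neg h1, if_neg h2]; exact ih a b

lemma init_eq_top2 (x0 x1 : Int) :
    somaMaxTop2Step (somaMaxTop2Step (none, none) x0) x1 =
      (some (if x0 ≥ x1 then (x0, x1) else (x1, x0)).1,
       some (if x0 ≥ x1 then (x0, x1) else (x1, x0)).2) := by
  simp only [somaMaxTop2Step]
  by_cases h : x1 > x0
  · simp only [if_pos h, if_neg (by omega : ¬ x0 ≥ x1)]
  · simp only [if_neg h, if_pos (by omega : x0 ≥ x1)]

-- invariant of the single pass: the state is the top two values (second = max after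
-- removing one copy of the first), in Option form by length
def Top2Inv (l : List Int) (st : Option Int × Option Int) : Prop :=
  match st with
  | (none, none) => l = []
  | (some m1, none) => l = [m1]
  | (none, some _) => False
  | (some m1, some m2) =>
      2 ≤ l.length ∧
      (∀ (k : Nat) (hk : k < l.length), l[k] ≤ m1) ∧
      ∃ (i1 : Nat) (h1 : i1 < l.length), l[i1] = m1 ∧
        (∀ (k : Nat) (hk : k < l.length), k ≠ i1 → l[k] ≤ m2) ∧
        ∃ (i2 : Nat) (h2 : i2 < l.length), i2 ≠ i1 ∧ l[i2] = m2

lemma top2_inv (l : List Int) : Top2Inv l (l.foldl somaMaxTop2Step (none, none)) := by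
  induction l using List.reverseRecOn with
  | nil => simp [Top2Inv]
  | append_singleton l x ih =>
    rw [List.foldl_append]
    rcases hst : l.foldl somaMaxTop2Step (none, none) with ⟨o1, o2⟩
    rw [hst] at ih
    match o1, o2 with
    | none, none =>
      have hl : l = [] := ih
      subst hl
      simp [somaMaxTop2Step, Top2Inv]
    | none, some m2 => exact ih.elim
    | some m1, none =>
      have hl : l = [m1] := ih
      subst hl
      by_cases hx : x > m1
      · simp only [somaMaxTop2Step, List.foldl_cons, List.foldl_nil, if_pos hx, Top2Inv]
        refine ⟨by simp, ?_, 1, by simp, by simp, ?_, 0, by simp, by simp, by simp⟩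
        · intro k hk; simp at hk; interval_cases k <;> (simp; try omega)
        · intro k hk hk1; simp at hk; interval_cases k <;> simp_all
      · simp only [somaMaxTop2Step, List.foldl_cons, List.foldl_nil, if_neg hx, Top2Inv]
        refine ⟨by simp, ?_, 0, by simp, by simp, ?_, 1, by simp, by simp, by simp⟩
        · intro k hk; simp at hk; interval_cases k <;> (simp; try omega)
        · intro k hk hk1; simp at hk; interval_cases k <;> simp_all
    | some m1, some m2 =>
      obtain ⟨hlen, hub, i1, h1, hi1, hsec, i2, h2, hne12, hi2⟩ := ih
      have hm2m1 : m2 ≤ m1 := hi2 ▸ hub i2 h2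
      show Top2Inv (l ++ [x])
        (if x > m1 then (some x, some m1)
         else if x > m2 then (some m1, some x) else (some m1, some m2))
      split_ifs with hx1 hx2
      · -- x > m1 : new top is x at the appended position
        refine ⟨by simp; omega, ?_, l.length, by simp, by simp, ?_, i1, by simp; omega,
          by omega, by rw [List.getElem_append_left h1]; exact hi1⟩
        · intro k hk
          rcases Nat.lt_or_ge k l.length with h | h
          · rw [List.getElem_append_left h]; have := hub k h; omega
          · have hk' : k = l.length := by simp at hk; omega
            subst hk'; simp
        · intro k hk hkne
          have h : k < l.length := by simp at hk; omega
          rw [List.getElem_append_left h]; exact hub k h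
      · -- x ≤ m1, x > m2 : second place is now x
        refine ⟨by simp; omega, ?_, i1, by simp; omega,
          by rw [List.getElem_append_left h1]; exact hi1, ?_, l.length, by simp, by omega,
          by simp⟩
        · intro k hk
          rcases Nat.lt_or_ge k l.length with h | h
          · rw [List.getElem_append_left h]; exact hub k h
          · have hk' : k = l.length := by simp at hk; omega
            subst hk'; simp; omega
        · intro k hk hkne
          rcases Nat.lt_or_ge k l.length with h | h
          · rw [List.getElem_append_left h]; have := hsec k h hkne; omega
          · have hk' : k = l.length := by simp at hk; omega
            subst hk'; simp
      · -- x ≤ m2 : state unchanged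
        refine ⟨by simp; omega, ?_, i1, by simp; omega,
          by rw [List.getElem_append_left h1]; exact hi1, ?_, i2, by simp; omega, hne12,
          by rw [List.getElem_append_left h2]; exact hi2⟩
        · intro k hk
          rcases Nat.lt_or_ge k l.length with h | h
          · rw [List.getElem_append_left h]; exact hub k h
          · have hk' : k = l.length := by simp at hk; omega
            subst hk'; simp; omega
        · intro k hk hkne
          rcases Nat.lt_or_ge k l.length with h | h
          · rw [List.getElem_append_left h]; exact hsec k h hkne
          · have hk' : k = l.length := by simp at hk; omega
            subst hk'; simp; omega

lemma findSome?_range_first {β : Type} (n : Nat) (F : Nat → Option β) (k : Nat) (b : β)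
    (hkn : k < n) (hnone : ∀ j < k, F j = none) (hk : F k = some b) :
    (List.range n).findSome? F = some b := by
  have hsplit : n = k + (n - k) := by omega
  rw [hsplit, List.range_add, List.findSome?_append]
  have h1 : (List.range k).findSome? F = none := by
    rw [List.findSome?_eq_none_iff]
    intro x hx
    exact hnone x (List.mem_range.mp hx)
  have h2 : n - k = (n - k - 1) + 1 := by omega
  rw [h1, h2, List.range_succ_eq_map]
  simp only [List.map_cons, List.findSome?_cons, Nat.add_zero, hk, Option.none_or]

lemma somaMax_alt_cons2 (x0 x1 : Int) (rest : List Int) (m1 m2 : Int)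
    (hst : rest.foldl somaMaxAltStep (if x0 ≥ x1 then (x0, x1) else (x1, x0)) = (m1, m2)) :
    somaMax_alt (x0 :: x1 :: rest) =
      (match (x0 :: x1 :: rest).find? (fun v => decide (m2 ≤ v)) with
       | some v => [m1 + m2, v, m1 + m2 - v]
       | none => []) := by
  simp only [somaMax_alt, hst]

-- for a list of length ≥ 2, the state of B's pass, in Option form, with the invariant
lemma top2_of_cons2 (x0 x1 : Int) (rest : List Int) :
    (x0 :: x1 :: rest).foldl somaMaxTop2Step (none, none) =
      (some ((rest.foldl somaMaxAltStep (if x0 ≥ x1 then (x0, x1) else (x1, x0))).1),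
       some ((rest.foldl somaMaxAltStep (if x0 ≥ x1 then (x0, x1) else (x1, x0))).2)) := by
  rw [List.foldl_cons, List.foldl_cons, init_eq_top2]
  by_cases h : x0 ≥ x1
  · simp only [if_pos h]; exact altStep_eq_top2 rest x0 x1
  · simp only [if_neg h]; exact altStep_eq_top2 rest x1 x0

theorem somaMax_eq_alt_of_notD (l : List Int) (hpre : 2 ≤ l.length) (hnd : ¬ D_somaMax l) :
    somaMax l = somaMax_alt l := by
  match l, hpre with
  | x0 :: x1 :: rest, _ =>
    set l := x0 :: x1 :: rest with hl
    have hinv := top2_inv l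
    rw [top2_of_cons2] at hinv
    rcases hst : rest.foldl somaMaxAltStep (if x0 ≥ x1 then (x0, x1) else (x1, x0)) with ⟨m1, m2⟩
    rw [hst] at hinv
    dsimp only at hinv
    obtain ⟨hlen, hub, i1, h1, hi1, hsec, i2, h2, hne12, hi2⟩ := hinv
    have hm2m1 : m2 ≤ m1 := hi2 ▸ hub i2 h2
    have hpair : ∀ (a b : Nat), a < l.length → b < l.length → a ≠ b →
        (∀ (ha : a < l.length) (hb : b < l.length), l[a] + l[b] ≤ m1 + m2) := by
      intro a b ha hb hab _ _
      by_cases hai : a = i1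
      · subst hai
        have hbs := hsec b hb (fun hbe => hab hbe.symm)
        have hua := hub a ha
        omega
      · have hbs := hsec a ha hai
        have hua := hub b hb
        omega
    have hub' : ∀ p ∈ somaMaxPS l, p.1 + p.2 ≤ m1 + m2 := by
      intro p hp
      rcases mem_PS.mp hp with ⟨a, b, ha, hb, hab, rfl⟩
      exact hpair a b ha hb hab ha hb
    -- ¬ D_ gives a pair with sum > -1, hence m1 + m2 > -1
    have hS : ¬ m1 + m2 ≤ -1 := by
      intro hle
      apply hnd
      refine ⟨by simp [hl], ?_⟩
      intro a ha b hb hab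
      have := hpair a b ha hb hab ha hb
      rw [List.getD_eq_getElem _ _ ha, List.getD_eq_getElem _ _ hb]
      omega
    rcases hfB : l.find? (fun v => decide (m2 ≤ v)) with _ | vstar
    · exfalso
      rw [List.find?_eq_none] at hfB
      have := hfB l[i1] (l.getElem_mem h1)
      rw [hi1] at this
      simp [hm2m1] at this
    obtain ⟨hpv, k, hkl, hkv, hkmin⟩ := List.find?_eq_some_iff_getElem.mp hfB
    simp only [decide_eq_true_eq] at hpv
    have hex : ∃ p ∈ somaMaxPS l, p.1 + p.2 = m1 + m2 :=
      ⟨(l[i1], l[i2]), mem_PS.mpr ⟨i1, i2, h1, h2, fun h => hne12 h.symm, rfl⟩,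
        by rw [hi1, hi2]⟩
    obtain ⟨q, hfind, hfold⟩ :=
      foldl_updP_found (somaMaxPS l) (-1, 0, 0) (m1 + m2) (by omega) hub' hex
    have hfind2 : (somaMaxPS l).find? (fun p => decide (p.1 + p.2 = m1 + m2)) =
        some (l[k], m1 + m2 - l[k]) := by
      unfold somaMaxPS
      rw [List.find?_flatMap]
      apply findSome?_range_first l.length _ k _ hkl
      · intro j hjk
        rw [List.find?_map]
        have hnone : ((List.range l.length).filter (fun b => decide (¬ j = b))).find?
            ((fun p : Int × Int => decide (p.1 + p.2 = m1 + m2)) ∘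
              (fun b => (l.getD j 0, l.getD b 0))) = none := by
          rw [List.find?_eq_none]
          intro b hbmem
          rcases List.mem_filter.mp hbmem with ⟨hbr, _⟩
          have hb : b < l.length := List.mem_range.mp hbr
          have hjl : j < l.length := lt_trans hjk hkl
          have hubb := hub b hb
          have hmin := hkmin j hjk
          simp only [Bool.not_eq_eq_eq_not, Bool.not_true, decide_eq_false_iff_not,
            not_le] at hmin
          simp only [Function.comp, decide_eq_true_eq,
            List.getD_eq_getElem _ _ hjl, List.getD_eq_getElem _ _ hb]
          omega
        rw [hnone]; rfl
      · rw [List.find?_map]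
        have hex2 : ∃ b ∈ (List.range l.length).filter (fun b => decide (¬ k = b)),
            ((fun p : Int × Int => decide (p.1 + p.2 = m1 + m2)) ∘
              (fun b => (l.getD k 0, l.getD b 0))) b = true := by
          by_cases hki : k = i1
          · subst hki
            refine ⟨i2, List.mem_filter.mpr ⟨List.mem_range.mpr h2, ?_⟩, ?_⟩
            · simp only [decide_eq_true_eq]; exact fun h => hne12 h.symm
            · simp only [Function.comp, decide_eq_true_eq,
                List.getD_eq_getElem _ _ hkl, List.getD_eq_getElem _ _ h2, hi1, hi2]
          · have hkm2 : l[k] = m2 := le_antisymm (hsec k hkl hki) (hkv ▸ hpv)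
            refine ⟨i1, List.mem_filter.mpr ⟨List.mem_range.mpr h1, ?_⟩, ?_⟩
            · simp only [decide_eq_true_eq]; exact hki
            · simp only [Function.comp, decide_eq_true_eq,
                List.getD_eq_getElem _ _ hkl, List.getD_eq_getElem _ _ h1, hkm2, hi1]
              omega
        rcases hfj : ((List.range l.length).filter (fun b => decide (¬ k = b))).find?
            ((fun p : Int × Int => decide (p.1 + p.2 = m1 + m2)) ∘
              (fun b => (l.getD k 0, l.getD b 0))) with _ | j0
        · exfalso
          have hsome := List.find?_isSome.mpr hex2
          rw [hfj] at hsome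
          simp at hsome
        · have hpj := List.find?_some hfj
          simp only [Function.comp, decide_eq_true_eq] at hpj
          simp only [Option.map_some]
          have hk0 : l.getD k 0 = l[k] := List.getD_eq_getElem _ _ hkl
          rw [hk0] at hpj ⊢
          have : l.getD j0 0 = m1 + m2 - l[k] := by omega
          rw [this]
    rw [hfind] at hfind2
    have hq : q = (l[k], m1 + m2 - l[k]) := Option.some_inj.mp hfind2
    rw [somaMax_eq_PS, hfold, hq]
    rw [somaMax_alt_cons2 x0 x1 rest m1 m2 hst, ← hl, hfB, hkv]

-- ===== VERDICT (by name: the statement is the Claim_ definition above) =====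
theorem somaMax_spec : Claim_unchanged_somaMax := by
  intro lista _ hpre
  unfold Spec_somaMax
  intro hnd
  exact somaMax_eq_alt_of_notD lista hpre hnd

theorem somaMax_changed : Claim_changed_somaMax := by unfold Claim_changed_somaMax; decide

theorem somaMax_tight : Claim_exact_somaMax := by
  intro lista _ hpre hd
  match lista, hpre with
  | x0 :: x1 :: rest, _ =>
    set l := x0 :: x1 :: rest with hl
    obtain ⟨_, hdall⟩ := hd
    -- A returns [-1, 0, 0] since every pair sum is ≤ -1
    have hA : somaMax l = [-1, 0, 0] := by
      rw [somaMax_eq_PS, foldl_updP_stable]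
      intro p hp
      rcases mem_PS.mp hp with ⟨a, b, ha, hb, hab, rfl⟩
      have := hdall a ha b hb hab
      rw [List.getD_eq_getElem _ _ ha, List.getD_eq_getElem _ _ hb] at this
      exact this
    -- B returns [s, v, s - v] with s ≤ -1, which can never equal [-1, 0, 0]
    have hinv := top2_inv l
    rw [top2_of_cons2] at hinv
    rcases hst : rest.foldl somaMaxAltStep (if x0 ≥ x1 then (x0, x1) else (x1, x0)) with ⟨m1, m2⟩
    rw [hst] at hinv
    dsimp only at hinv
    obtain ⟨hlen, hub, i1, h1, hi1, hsec, i2, h2, hne12, hi2⟩ := hinv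
    have hm2m1 : m2 ≤ m1 := hi2 ▸ hub i2 h2
    have hsle : m1 + m2 ≤ -1 := by
      have := hdall i1 h1 i2 h2 (fun h => hne12 h.symm)
      rw [List.getD_eq_getElem _ _ h1, List.getD_eq_getElem _ _ h2, hi1, hi2] at this
      exact this
    rcases hfB : l.find? (fun v => decide (m2 ≤ v)) with _ | vstar
    · exfalso
      rw [List.find?_eq_none] at hfB
      have := hfB l[i1] (l.getElem_mem h1)
      rw [hi1] at this
      simp [hm2m1] at this
    have hB : somaMax_alt l = [m1 + m2, vstar, m1 + m2 - vstar] := by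
      rw [somaMax_alt_cons2 x0 x1 rest m1 m2 hst, ← hl, hfB]
    rw [hA, hB]
    intro heq
    have h0 : (-1 : Int) = m1 + m2 := by injection heq
    have h1' : (0 : Int) = vstar ∧ [(0 : Int)] = [m1 + m2 - vstar] := by
      have := (List.cons.injEq _ _ _ _).mp heq
      exact ⟨(List.cons.injEq _ _ _ _).mp this.2 |>.1,
        ((List.cons.injEq _ _ _ _).mp this.2).2⟩
    have h2' : (0 : Int) = m1 + m2 - vstar := by
      have := (List.cons.injEq _ _ _ _).mp h1'.2
      exact this.1
    omega
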